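-- pv_equiv track=rewrite | github.com/lincolnoliveira/exercicios-wttd | poker/poker.py | gruposCartas
-- ===== SOURCE A (Python) =====
-- ordemCartas = "234567891JQKA"
--
-- def valorCarta(carta):
--     '''
--     retorna o "valor" da carta, sendo 2 a mais baixa (2) e 14 a mais alta (ás) -- começa em 2 para ser mais intuitivo
--     :param carta: representação da carta, string, o primeiro ou os dois primeiros chars representam o número/figura e o último char o naipe
--     :return:   valor da carta
--     '''
--     return ordemCartas.find(carta[0]) + 2 # primeira [0] letra
--
-- def listaValoresOrdenados(listaCartas, decrescente=False):
--     '''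
--      Retorna uma lista ordenada com os valores das cartas recebidas
--     :param listaCartas: lista de cartas no formato conhecido, em qualquer ordem
--     :return: lista ordenada com os valores das cartas recebidas
--     '''
--     ordenada = []
--     for carta in listaCartas:
--         ordenada.append(valorCarta(carta))
--     ordenada.sort(reverse=decrescente)
--     return ordenada
--
-- def gruposCartas(listaCartas):
--     '''
--     Identifica os grupos de cartas com mesmo valor, retornando um dicionário com os grupos
--     :param listaCartas: listaCartas: lista de cartas no formato conhecido, em qualquer ordem
--     :return: dicionário na forma {'Quadra':qtos, 'Trinca':qtos, 'Par1':qtos, 'Par2':qtos}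
--     '''
--     grupos = {'Quadra':0, 'Trinca':0, 'Par1':0, 'Par2':0}
--     ordenada = listaValoresOrdenados(listaCartas,True)
--     # acrescenta 0, que não é um valor válido, no final da lista para forçar o teste dentro do loop; senão teria que fazer todos os testes no fim do loop de novo
--     ordenada.append(0)
--     repetidos = 1
--     anterior = ordenada[0]
--     for atual in ordenada[1:]:
--         if anterior == atual:
--             repetidos += 1
--         else:
--             if repetidos == 4:
--                 grupos['Quadra'] = anterior
--             elif repetidos == 3:
--                 grupos['Trinca'] = anterior
--             elif repetidos == 2:
--                 if grupos['Par1'] == 0: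
--                     grupos['Par1'] = anterior
--                 else:
--                     grupos['Par2'] = anterior
--
--             repetidos = 1
--             anterior = atual
--
--
--     return grupos
-- ===== SOURCE B (Python) =====
-- ordemCartas = "234567891JQKA"
--
-- def valorCarta(carta):
--     return ordemCartas.find(carta[0]) + 2
--
-- def gruposCartas(listaCartas):
--     grupos = {'Quadra': 0, 'Trinca': 0, 'Par1': 0, 'Par2': 0}
--     contagem = {}
--     for carta in listaCartas:
--         v = valorCarta(carta)
--         contagem[v] = contagem.get(v, 0) + 1
--     for valor in sorted(contagem, reverse=True):
--         n = contagem[valor]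
--         if n == 4:
--             grupos['Quadra'] = valor
--         elif n == 3:
--             grupos['Trinca'] = valor
--         elif n == 2:
--             if grupos['Par1'] == 0:
--                 grupos['Par1'] = valor
--             else:
--                 grupos['Par2'] = valor
--     return grupos
-- ===== Notes on version B (the rewrite author's own statement) =====
-- stated objective: idiomatic
-- what changed: Replaces the sentinel-terminated run-length scan over the descending-sorted value list by a frequency dictionary built in one pass plus a loop over the distinct values in descending order.
import Mathlib
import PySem

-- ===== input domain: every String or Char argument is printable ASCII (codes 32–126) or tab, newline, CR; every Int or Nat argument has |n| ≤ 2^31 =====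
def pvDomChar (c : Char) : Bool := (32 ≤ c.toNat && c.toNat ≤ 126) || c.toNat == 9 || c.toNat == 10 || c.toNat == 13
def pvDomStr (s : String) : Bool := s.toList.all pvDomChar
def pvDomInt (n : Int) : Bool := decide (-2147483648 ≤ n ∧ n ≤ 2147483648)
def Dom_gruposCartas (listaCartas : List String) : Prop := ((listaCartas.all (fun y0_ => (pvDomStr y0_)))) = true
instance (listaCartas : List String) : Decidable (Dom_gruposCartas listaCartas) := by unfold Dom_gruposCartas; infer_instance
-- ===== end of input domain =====

-- B replaces A's sentinel-terminated run-length scan of the descending-sorted value list by a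
-- frequency dictionary built in one pass plus a loop over the distinct values in descending order
-- (objective: idiomatic; return value only, neither implementation mutates its argument).

-- ===== PORT A =====
def ordemCartas : String := "234567891JQKA"

-- shared module helper (both Pythons call it): ordemCartas.find(carta[0]) + 2
def valorCarta (carta : String) : Int :=
  match PySem.Str.pyGet? carta 0 with
  | some c => PySem.Str.find ordemCartas (String.ofList [c]) + 2
  | none => 0  -- Python raises IndexError on carta = ""; such inputs are excluded by Pre_

def listaValoresOrdenados (listaCartas : List String) (decrescente : Bool) : List Int :=
  let ordenada := listaCartas.foldl (fun acc carta => acc ++ [valorCarta carta]) []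
  PySem.List.sorted ordenada (fun x => x) decrescente

def gruposCartas (listaCartas : List String) : List (String × Int) :=
  let grupos : PySem.Dict String Int :=
    PySem.Dict.ofList [("Quadra", 0), ("Trinca", 0), ("Par1", 0), ("Par2", 0)]
  let ordenada := listaValoresOrdenados listaCartas true ++ [0]
  let anterior := PySem.List.pyGetD ordenada 0 0
  let fin := (PySem.List.slice ordenada (some 1) none).foldl
    (fun (st : Int × Int × PySem.Dict String Int) atual =>
      if st.2.1 == atual then (st.1 + 1, st.2.1, st.2.2)
      else
        ((1 : Int), atual,
          if st.1 == 4 then st.2.2.insert "Quadra" st.2.1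
          else if st.1 == 3 then st.2.2.insert "Trinca" st.2.1
          else if st.1 == 2 then
            (if st.2.2.getD "Par1" 0 == 0 then st.2.2.insert "Par1" st.2.1
             else st.2.2.insert "Par2" st.2.1)
          else st.2.2))
    ((1 : Int), anterior, grupos)
  fin.2.2.items

-- ===== PORT B =====
def gruposCartas_alt (listaCartas : List String) : List (String × Int) :=
  let grupos : PySem.Dict String Int :=
    PySem.Dict.ofList [("Quadra", 0), ("Trinca", 0), ("Par1", 0), ("Par2", 0)]
  let contagem := listaCartas.foldl
    (fun (d : PySem.Dict Int Int) carta =>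
      d.insert (valorCarta carta) (d.getD (valorCarta carta) 0 + 1))
    PySem.Dict.empty
  let fin := (PySem.List.sorted contagem.keys (fun x => x) true).foldl
    (fun (grupos : PySem.Dict String Int) valor =>
      let n := contagem.getD valor 0
      if n == 4 then grupos.insert "Quadra" valor
      else if n == 3 then grupos.insert "Trinca" valor
      else if n == 2 then
        (if grupos.getD "Par1" 0 == 0 then grupos.insert "Par1" valor
         else grupos.insert "Par2" valor)
      else grupos)
    grupos
  fin.items

-- ===== PRECONDITION & SPEC =====
-- Pre_ excludes lists containing an empty string: there carta[0] raises IndexError in A (and in B).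
def Pre_gruposCartas (listaCartas : List String) : Prop := ∀ s ∈ listaCartas, s ≠ ""
instance (listaCartas : List String) : Decidable (Pre_gruposCartas listaCartas) := by
  unfold Pre_gruposCartas; infer_instance

def pvWitness_gruposCartas : List String := ["2s", "2d", "As", "Ah", "7c"]

def Spec_gruposCartas (listaCartas : List String) (out : List (String × Int)) : Prop :=
  out = gruposCartas_alt listaCartas
instance (listaCartas : List String) (out : List (String × Int)) : Decidable (Spec_gruposCartas listaCartas out) := by
  unfold Spec_gruposCartas; infer_instance

-- ===== CLAIM (what is proved, stated in full; the proofs are below) =====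
def Claim_equal_gruposCartas : Prop := ∀ (listaCartas : List String), Dom_gruposCartas listaCartas → Pre_gruposCartas listaCartas → Spec_gruposCartas listaCartas (gruposCartas listaCartas)

-- ===== LEMMAS AND PROOFS =====

-- the common assignment step: what both loops do with a value that occurs n times
def pvStep (g : PySem.Dict String Int) (p : Int × Int) : PySem.Dict String Int :=
  if p.2 == 4 then g.insert "Quadra" p.1
  else if p.2 == 3 then g.insert "Trinca" p.1
  else if p.2 == 2 then
    (if g.getD "Par1" 0 == 0 then g.insert "Par1" p.1 else g.insert "Par2" p.1)
  else g

-- run-length encoding of a list (A's scan processes exactly these runs)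
def pvRuns : List Int → List (Int × Int)
  | [] => []
  | x :: xs =>
      (x, 1 + ((xs.takeWhile (· == x)).length : Int)) :: pvRuns (xs.dropWhile (· == x))
  termination_by l => l.length
  decreasing_by
    simp only [List.length_cons]
    exact Nat.lt_succ_of_le (List.length_dropWhile_le _ _)

def pvAddFirst (rep : Int) : List (Int × Int) → List (Int × Int)
  | [] => []
  | (v, n) :: r => (v, n + rep - 1) :: r

theorem pvAddFirst_one (l : List (Int × Int)) : pvAddFirst 1 l = l := by
  cases l with
  | nil => rfl
  | cons p r => obtain ⟨v, n⟩ := p; simp [pvAddFirst]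

-- A's loop body with explicit state (repetidos, anterior, grupos)
def pvBodyA (st : Int × Int × PySem.Dict String Int) (atual : Int) :
    Int × Int × PySem.Dict String Int :=
  if st.2.1 == atual then (st.1 + 1, st.2.1, st.2.2)
  else
    ((1 : Int), atual,
      if st.1 == 4 then st.2.2.insert "Quadra" st.2.1
      else if st.1 == 3 then st.2.2.insert "Trinca" st.2.1
      else if st.1 == 2 then
        (if st.2.2.getD "Par1" 0 == 0 then st.2.2.insert "Par1" st.2.1
         else st.2.2.insert "Par2" st.2.1)
      else st.2.2)

theorem pvRuns_cons_cons_self (x : Int) (xs : List Int) :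
    pvRuns (x :: x :: xs) =
      (x, 1 + ((xs.takeWhile (· == x)).length : Int) + 1) :: pvRuns (xs.dropWhile (· == x)) := by
  rw [pvRuns, List.takeWhile_cons_of_pos (p := fun y => y == x) (by simp),
    List.dropWhile_cons_of_pos (p := fun y => y == x) (by simp)]
  congr 2

theorem pvRuns_cons_cons_ne (x y : Int) (ys : List Int) (h : y ≠ x) :
    pvRuns (x :: y :: ys) = (x, 1) :: pvRuns (y :: ys) := by
  rw [pvRuns, List.takeWhile_cons_of_neg (p := fun z => z == x) (by simpa using h),
    List.dropWhile_cons_of_neg (p := fun z => z == x) (by simpa using h)]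
  simp

theorem pvScan_eq_runs (xs : List Int) : ∀ (prev rep : Int) (g : PySem.Dict String Int),
    prev ≠ 0 → (∀ x ∈ xs, x ≠ 0) →
    ((xs ++ [0]).foldl pvBodyA (rep, prev, g)).2.2
      = (pvAddFirst rep (pvRuns (prev :: xs))).foldl pvStep g := by
  induction xs with
  | nil =>
      intro prev rep g hprev _
      simp only [List.nil_append, List.foldl_cons, List.foldl_nil, pvBodyA, pvRuns,
        List.takeWhile_nil, List.dropWhile_nil, List.length_nil, pvAddFirst]
      have h0 : (prev == (0 : Int)) = false := by simpa using hprev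
      have hrep : 1 + ((0 : Nat) : Int) + rep - 1 = rep := by push_cast; ring
      rw [hrep]
      simp [h0, pvStep]
  | cons x xs' ih =>
      intro prev rep g hprev hall
      have hx0 : x ≠ 0 := hall x (by simp)
      have hall' : ∀ y ∈ xs', y ≠ 0 := fun y hy => hall y (by simp [hy])
      by_cases h : prev = x
      · subst h
        have hstep : pvBodyA (rep, prev, g) prev = (rep + 1, prev, g) := by
          simp [pvBodyA]
        rw [List.cons_append, List.foldl_cons, hstep, ih prev (rep + 1) g hprev hall',
          pvRuns_cons_cons_self]
        conv_lhs => rw [pvRuns]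
        simp only [pvAddFirst]
        congr 3
        ring
      · have hne : (prev == x) = false := by simpa using h
        have hstep : pvBodyA (rep, prev, g) x = ((1 : Int), x, pvStep g (prev, rep)) := by
          simp [pvBodyA, pvStep, hne]
        rw [List.cons_append, List.foldl_cons, hstep, ih x 1 _ hx0 hall', pvAddFirst_one,
          pvRuns_cons_cons_ne prev x xs' (Ne.symm h)]
        simp only [pvAddFirst, List.foldl_cons]
        have hrep : (1 : Int) + rep - 1 = rep := by ring
        rw [hrep]

-- every element below the head of a descending run-decomposition is strictly smaller
theorem pvDrop_lt (x : Int) (xs : List Int)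
    (h : (x :: xs).Pairwise (fun a b => b ≤ a)) :
    ∀ y ∈ xs.dropWhile (· == x), y < x := by
  have hsub : (xs.dropWhile (· == x)).Sublist xs := List.dropWhile_sublist _
  cases hdw : xs.dropWhile (· == x) with
  | nil => simp
  | cons h0 t =>
      have hh0x : h0 ≠ x := by
        have := List.head?_dropWhile_not (· == x) xs
        rw [hdw] at this; simpa using this
      have hh0le : h0 ≤ x := (List.pairwise_cons.mp h).1 h0 (hsub.mem (by rw [hdw]; simp))
      have hh0lt : h0 < x := lt_of_le_of_ne hh0le hh0x
      have hpw : (h0 :: t).Pairwise (fun a b => b ≤ a) := by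
        rw [← hdw]; exact ((List.pairwise_cons.mp h).2).sublist (List.dropWhile_sublist _)
      intro y hy
      rcases List.mem_cons.mp hy with rfl | hyt
      · exact hh0lt
      · exact lt_of_le_of_lt ((List.pairwise_cons.mp hpw).1 y hyt) hh0lt

-- folding Set.add over elements not equal to a head already present keeps the head in front
theorem pvFoldl_add_cons (b : List Int) : ∀ (s : List Int) (x : Int), x ∉ b →
    List.foldl PySem.Set.add (x :: s) b = x :: List.foldl PySem.Set.add s b := by
  induction b with
  | nil => intro s x _; rfl
  | cons y t ih =>
      intro s x hx
      have hyx : (y == x) = false := by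
        have : y ≠ x := fun h => hx (by simp [h])
        simpa using this
      have hcc : PySem.Set.contains (x :: s) y = PySem.Set.contains s y := by
        have hne' : y ≠ x := by simpa using hyx
        simp [PySem.Set.contains, hne']
      simp only [List.foldl_cons, PySem.Set.add, hcc]
      by_cases hc : PySem.Set.contains s y = true
      · rw [if_pos hc, if_pos hc]
        exact ih s x (fun h => hx (by simp [h]))
      · rw [if_neg hc, if_neg hc, List.cons_append]
        exact ih (s ++ [y]) x (fun h => hx (by simp [h]))

-- folding Set.add over copies of an element already present does nothing
theorem pvFoldl_add_dup (a : List Int) : ∀ (s : List Int) (x : Int),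
    (∀ y ∈ a, y = x) → PySem.Set.contains s x = true → List.foldl PySem.Set.add s a = s := by
  induction a with
  | nil => intro s x _ _; rfl
  | cons y t ih =>
      intro s x hall hc
      have hy : y = x := hall y (by simp)
      subst hy
      simp only [List.foldl_cons, PySem.Set.add, hc, if_true]
      exact ih s y (fun z hz => hall z (by simp [hz])) hc

theorem pvOfList_cons_split (x : Int) (a b : List Int)
    (ha : ∀ y ∈ a, y = x) (hb : x ∉ b) :
    PySem.Set.ofList (x :: (a ++ b)) = x :: PySem.Set.ofList b := by
  show List.foldl PySem.Set.add PySem.Set.empty (x :: (a ++ b)) = _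
  have h1 : PySem.Set.add PySem.Set.empty x = [x] := rfl
  rw [List.foldl_cons, h1, List.foldl_append]
  rw [pvFoldl_add_dup a [x] x ha (by simp [PySem.Set.contains])]
  exact pvFoldl_add_cons b [] x hb

-- the run-length encoding of a descending-sorted list lists each distinct value once,
-- in order, with its total count
theorem pvRuns_eq_counts (s : List Int) (hs : s.Pairwise (fun a b => b ≤ a)) :
    pvRuns s = (PySem.Set.ofList s).map (fun k => (k, (s.count k : Int))) := by
  induction s using pvRuns.induct with
  | case1 => simp [pvRuns, PySem.Set.ofList, PySem.Set.empty]
  | case2 x xs ih =>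
      have hblt := pvDrop_lt x xs hs
      have hxb : x ∉ xs.dropWhile (· == x) := fun h => lt_irrefl x (hblt x h)
      have ha : ∀ y ∈ xs.takeWhile (· == x), y = x := by
        intro y hy; simpa using List.mem_takeWhile_imp hy
      have hsplit : xs.takeWhile (· == x) ++ xs.dropWhile (· == x) = xs :=
        List.takeWhile_append_dropWhile
      have hbpw : (xs.dropWhile (· == x)).Pairwise (fun a b => b ≤ a) :=
        ((List.pairwise_cons.mp hs).2).sublist (List.dropWhile_sublist _)
      rw [pvRuns, ih hbpw]
      have hofl : PySem.Set.ofList (x :: xs) = x :: PySem.Set.ofList (xs.dropWhile (· == x)) := by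
        conv_lhs => rw [← hsplit]
        exact pvOfList_cons_split x _ _ ha hxb
      rw [hofl, List.map_cons]
      have hxs : xs.count x = (xs.takeWhile (· == x)).length := by
        have h1 : (xs.takeWhile (· == x)).count x = (xs.takeWhile (· == x)).length :=
          List.count_eq_length.mpr (fun b hb => (ha b hb).symm)
        have h2 : (xs.dropWhile (· == x)).count x = 0 := List.count_eq_zero.mpr hxb
        conv_lhs => rw [← hsplit]
        rw [List.count_append, h1, h2]
        omega
      congr 1
      · -- count of the head
        rw [List.count_cons_self, hxs]
        push_cast
        ring_nf
      · -- counts of the remaining distinct values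
        apply List.map_congr_left
        intro k hk
        have hkb : k ∈ xs.dropWhile (· == x) := (PySem.Set.mem_ofList _ _).mp hk
        have hkx : k ≠ x := fun h => lt_irrefl x (h ▸ hblt k hkb)
        have hcnt : (x :: xs).count k = (xs.dropWhile (· == x)).count k := by
          have h1 : (xs.takeWhile (· == x)).count k = 0 :=
            List.count_eq_zero.mpr (fun hka => hkx (ha k hka))
          rw [List.count_cons, if_neg (by simpa using (Ne.symm hkx))]
          conv_lhs => rw [← hsplit]
          rw [List.count_append, h1]
          omega
        rw [hcnt]

-- the first-occurrence dedup of a descending-sorted list is strictly descending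
theorem pvOfList_pairwise_gt (s : List Int) (hs : s.Pairwise (fun a b => b ≤ a)) :
    (PySem.Set.ofList s).Pairwise (fun a b => b < a) := by
  induction s using pvRuns.induct with
  | case1 => simp [PySem.Set.ofList, PySem.Set.empty]
  | case2 x xs ih =>
      have hblt := pvDrop_lt x xs hs
      have hxb : x ∉ xs.dropWhile (· == x) := fun h => lt_irrefl x (hblt x h)
      have ha : ∀ y ∈ xs.takeWhile (· == x), y = x := by
        intro y hy; simpa using List.mem_takeWhile_imp hy
      have hsplit : xs.takeWhile (· == x) ++ xs.dropWhile (· == x) = xs :=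
        List.takeWhile_append_dropWhile
      have hbpw : (xs.dropWhile (· == x)).Pairwise (fun a b => b ≤ a) :=
        ((List.pairwise_cons.mp hs).2).sublist (List.dropWhile_sublist _)
      have hofl : PySem.Set.ofList (x :: xs) = x :: PySem.Set.ofList (xs.dropWhile (· == x)) := by
        conv_lhs => rw [← hsplit]
        exact pvOfList_cons_split x _ _ ha hxb
      rw [hofl, List.pairwise_cons]
      exact ⟨fun y hy => hblt y ((PySem.Set.mem_ofList _ _).mp hy), ih hbpw⟩

theorem pvValorCarta_ne_zero (carta : String) (h : carta ≠ "") : valorCarta carta ≠ 0 := by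
  unfold valorCarta
  cases hg : PySem.Str.pyGet? carta 0 with
  | none =>
      exfalso
      rw [show ((0 : Int)) = ((0 : Nat) : Int) from rfl, PySem.Str.pyGet?_natCast] at hg
      have hlen : carta.toList.length = 0 := by
        rcases List.getElem?_eq_none_iff.mp hg with hle
        omega
      exact h (String.toList_eq_nil_iff.mp (List.eq_nil_of_length_eq_zero hlen))
  | some c =>
      show PySem.Str.find ordemCartas (String.ofList [c]) + 2 ≠ 0
      have := PySem.Chars.neg_one_le_find ordemCartas.toList (String.ofList [c]).toList
      rw [PySem.Str.find_eq]
      omega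

def pvG0 : PySem.Dict String Int :=
  PySem.Dict.ofList [("Quadra", 0), ("Trinca", 0), ("Par1", 0), ("Par2", 0)]

theorem pvA_eq (l : List String) :
    gruposCartas l =
      ((PySem.List.slice (PySem.List.sorted (l.map valorCarta) (fun x => x) true ++ [0])
          (some 1) none).foldl pvBodyA
        (1, PySem.List.pyGetD (PySem.List.sorted (l.map valorCarta) (fun x => x) true ++ [0]) 0 0,
          pvG0)).2.2.items := by
  unfold gruposCartas listaValoresOrdenados pvG0 pvBodyA
  simp only [PySem.List.foldl_append_singleton_eq_map, List.nil_append]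

theorem pvB_eq (l : List String) :
    gruposCartas_alt l =
      (((PySem.List.sorted (PySem.Set.ofList (l.map valorCarta)) (fun x => x) true).map
          (fun k => (k, ((l.map valorCarta).count k : Int)))).foldl pvStep pvG0).items := by
  have hc : l.foldl
      (fun (d : PySem.Dict Int Int) carta =>
        d.insert (valorCarta carta) (d.getD (valorCarta carta) 0 + 1)) PySem.Dict.empty
      = (l.map valorCarta).foldl (fun d v => d.insert v (d.getD v 0 + 1)) PySem.Dict.empty :=
    (List.foldl_map (f := valorCarta)
      (g := fun (d : PySem.Dict Int Int) v => d.insert v (d.getD v 0 + 1))).symm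
  have hkeys : (l.foldl
      (fun (d : PySem.Dict Int Int) carta =>
        d.insert (valorCarta carta) (d.getD (valorCarta carta) 0 + 1)) PySem.Dict.empty).keys
      = PySem.Set.ofList (l.map valorCarta) := by
    rw [hc, PySem.Dict.keys_foldl_insert]
    rfl
  have hgetD : ∀ k, (l.foldl
      (fun (d : PySem.Dict Int Int) carta =>
        d.insert (valorCarta carta) (d.getD (valorCarta carta) 0 + 1)) PySem.Dict.empty).getD k 0
      = ((l.map valorCarta).count k : Int) := by
    intro k
    rw [hc, PySem.Dict.getD_foldl_insert_add_one]
    simp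
  unfold gruposCartas_alt
  dsimp only
  simp only [hgetD, hkeys, List.foldl_map]
  rfl

-- ===== VERDICT (by name: the statement is the Claim_ definition above) =====
theorem gruposCartas_spec : Claim_equal_gruposCartas := by
  intro l _ hpre
  unfold Spec_gruposCartas
  rw [pvA_eq, pvB_eq]
  rcases eq_or_ne (l.map valorCarta) [] with hl | hvals_ne
  · rw [hl]
    rfl
  · obtain ⟨v, t, hs⟩ : ∃ v t,
          PySem.List.sorted (l.map valorCarta) (fun x => x) true = v :: t := by
        cases hsort : PySem.List.sorted (l.map valorCarta) (fun x => x) true with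
        | nil => exact absurd ((PySem.List.sorted_eq_nil_iff _ _ _).mp hsort) hvals_ne
        | cons a b => exact ⟨a, b, rfl⟩
    have hnz : ∀ y ∈ v :: t, y ≠ 0 := by
      intro y hy
      rw [← hs] at hy
      have hyv : y ∈ l.map valorCarta := (PySem.List.mem_sorted _ _ _ _).mp hy
      obtain ⟨carta, hcm, hval⟩ := List.mem_map.mp hyv
      exact hval ▸ pvValorCarta_ne_zero carta (hpre carta hcm)
    rw [hs]
    rw [List.cons_append, PySem.List.pyGetD_zero_cons,
      PySem.List.slice_from _ (by norm_num : (0 : Int) ≤ 1)]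
    simp only [Int.toNat_one, List.drop_succ_cons, List.drop_zero]
    rw [pvScan_eq_runs t v 1 pvG0 (hnz v (by simp)) (fun y hy => hnz y (by simp [hy])),
      pvAddFirst_one, ← hs]
    have hpw : (PySem.List.sorted (l.map valorCarta) (fun x => x) true).Pairwise
        (fun a b => b ≤ a) := by
      simpa using PySem.List.sorted_pairwise_rev (l.map valorCarta) (fun x => x)
    rw [pvRuns_eq_counts _ hpw]
    have hperm : (PySem.List.sorted (l.map valorCarta) (fun x => x) true).Perm
        (l.map valorCarta) := PySem.List.sorted_perm _ _ _
    have hfun : (fun k => (k,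
          ((PySem.List.sorted (l.map valorCarta) (fun x => x) true).count k : Int)))
        = fun k => (k, ((l.map valorCarta).count k : Int)) := by
      funext k
      rw [hperm.count_eq]
    have hsets : PySem.List.sorted (PySem.Set.ofList (l.map valorCarta)) (fun x => x) true
        = PySem.Set.ofList (PySem.List.sorted (l.map valorCarta) (fun x => x) true) := by
      apply PySem.List.sorted_rev_eq_of_perm_of_pairwise_gt
      · apply List.perm_of_nodup_nodup_toFinset_eq (PySem.Set.nodup_ofList _)
          (PySem.Set.nodup_ofList _)
        ext a
        simp [PySem.Set.mem_ofList, hperm.mem_iff]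
      · simpa using pvOfList_pairwise_gt _ hpw
    rw [hfun, hsets]
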